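-- pv_equiv track=rewrite | github.com/sjarmak/codeprobe | src/codeprobe/mining/_graph.py | _transitive_importers
-- ===== SOURCE A (Python) =====
-- from collections import deque
--
-- def _transitive_importers(rgraph: dict[str, set[str]], target: str) -> set[str]:
--     """Return all modules that can reach ``target`` via the import graph.
--
--     Excludes ``target`` itself. Includes both direct and indirect importers.
--     """
--     seen: set[str] = set()
--     queue: deque[str] = deque(rgraph.get(target, set()))
--     while queue:
--         mod = queue.popleft()
--         if mod in seen:
--             continue
--         seen.add(mod)
--         for parent in rgraph.get(mod, set()):
--             if parent not in seen:
--                 queue.append(parent)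
--     return seen
-- ===== SOURCE B (Python) =====
-- def _transitive_importers(rgraph: dict[str, set[str]], target: str) -> set[str]:
--     """Return all modules that can reach ``target`` via the import graph.
--
--     Naive fixed-point iteration: start from the direct importers and
--     repeatedly replace ``seen`` by ``seen`` united with the importers of
--     every member, until the set stops changing.  No queue, no frontier.
--     """
--     seen = set(rgraph.get(target, set()))
--     while True:
--         nxt = set(seen)
--         for m in seen:
--             nxt |= rgraph.get(m, set())
--         if nxt == seen:
--             return seen
--         seen = nxt
-- ===== Notes on version B (the rewrite author's own statement) =====
-- stated objective: alternative
-- what changed: Replaces the deque-based BFS worklist with a naive fixed-point (chaotic/Bellman-Ford-style) iteration: each round recomputes seen ∪ importers(seen) over the whole current set and stops when the set is stable, with no queue, frontier or per-node visitation order.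
import Mathlib
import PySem

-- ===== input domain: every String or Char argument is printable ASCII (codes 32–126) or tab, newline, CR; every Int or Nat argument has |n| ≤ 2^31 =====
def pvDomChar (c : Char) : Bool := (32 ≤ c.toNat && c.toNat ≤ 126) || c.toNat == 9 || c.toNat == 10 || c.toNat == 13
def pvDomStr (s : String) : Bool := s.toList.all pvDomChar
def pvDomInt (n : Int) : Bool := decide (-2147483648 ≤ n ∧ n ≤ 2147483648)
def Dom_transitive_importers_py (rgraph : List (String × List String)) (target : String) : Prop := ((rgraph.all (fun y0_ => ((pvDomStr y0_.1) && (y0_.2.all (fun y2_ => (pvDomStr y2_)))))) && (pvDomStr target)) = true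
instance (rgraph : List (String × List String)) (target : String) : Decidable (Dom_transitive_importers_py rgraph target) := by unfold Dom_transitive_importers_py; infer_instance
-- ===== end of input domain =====

-- B replaces the deque-based BFS worklist with a naive fixed-point iteration
-- (recompute seen ∪ importers(seen) until stable); equivalence is about the return value.

-- ===== PORT A =====
-- rgraph.get(k, set()) on the association list (lookup = first match)
def pvGetD (rgraph : List (String × List String)) (k : String) : List String :=
  match rgraph with
  | [] => []
  | (k', v) :: t => if k' = k then v else pvGetD t k

-- the 'while queue:' loop; fuel only makes the recursion total (proved never exhausted)
def pvLoopA (rgraph : List (String × List String)) : Nat → List String → List String → List String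
  | 0, seen, _ => seen
  | _ + 1, seen, [] => seen
  | f + 1, seen, mod :: q =>
      if mod ∈ seen then pvLoopA rgraph f seen q
      else pvLoopA rgraph f (seen ++ [mod])
        (q ++ (pvGetD rgraph mod).filter (fun p => p ∉ seen ++ [mod]))

def transitive_importers_py (rgraph : List (String × List String)) (target : String) : List String :=
  let queue := pvGetD rgraph target
  pvLoopA rgraph
    (queue.length + ((rgraph.flatMap (fun p => p.2)).length + 1) * (rgraph.map Prod.fst).dedup.length + 1)
    [] queue

-- ===== PORT B =====
-- one round: nxt = set(seen); for m in seen: nxt |= rgraph.get(m, set())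
def pvRound (rgraph : List (String × List String)) (s : PySem.Set String) : PySem.Set String :=
  s.foldl (fun nxt m => PySem.Set.update nxt (pvGetD rgraph m)) s

-- the 'while True:' loop; fuel only makes the recursion total (proved never exhausted)
def pvLoopFix (rgraph : List (String × List String)) : Nat → PySem.Set String → List String
  | 0, s => s
  | f + 1, s =>
      let t := pvRound rgraph s
      if PySem.Set.equal t s then s else pvLoopFix rgraph f t

def transitive_importers_py_alt (rgraph : List (String × List String)) (target : String) : List String :=
  pvLoopFix rgraph
    ((pvGetD rgraph target).length
      + ((rgraph.flatMap (fun p => p.2)).length + 1) * (rgraph.map Prod.fst).dedup.length + 1)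
    (PySem.Set.ofList (pvGetD rgraph target))

-- ===== PRECONDITION & SPEC =====
def Spec_transitive_importers_py (rgraph : List (String × List String)) (target : String) (out : List String) : Prop := out = transitive_importers_py_alt rgraph target
instance (rgraph : List (String × List String)) (target : String) (out : List String) : Decidable (Spec_transitive_importers_py rgraph target out) := by unfold Spec_transitive_importers_py; infer_instance

-- ===== CLAIM (what is proved, stated in full; the proofs are below) =====
def Claim_equal_transitive_importers_py : Prop := ∀ (rgraph : List (String × List String)) (target : String), Dom_transitive_importers_py rgraph target → Spec_transitive_importers_py rgraph target (transitive_importers_py rgraph target)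

-- ===== LEMMAS AND PROOFS =====

-- proof-only: the body of A's loop restricted to one queue element
def pvStep (rgraph : List (String × List String)) :
    List String × List String → String → List String × List String
  | (seen, nxt), mod =>
      if mod ∈ seen then (seen, nxt)
      else (seen ++ [mod], nxt ++ (pvGetD rgraph mod).filter (fun p => p ∉ seen ++ [mod]))

-- proof-only: A's loop processed a whole frontier at a time
def pvLoopF (rgraph : List (String × List String)) : Nat → List String → List String → List String
  | 0, seen, _ => seen
  | f + 1, seen, frontier =>
      if frontier.isEmpty then seen
      else
        let sn := frontier.foldl (pvStep rgraph) (seen, [])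
        pvLoopF rgraph f sn.1 sn.2

-- number of not-yet-seen keys
def pvCountK (rgraph : List (String × List String)) (seen : List String) : Nat :=
  (((rgraph.map Prod.fst).dedup).filter (fun x => x ∉ seen)).length

-- potential: strict upper bound machinery for the fuel
def pvPhi (rgraph : List (String × List String)) (seen q : List String) : Nat :=
  q.length + ((rgraph.flatMap (fun p => p.2)).length + 1) * pvCountK rgraph seen

-- the new elements a frontier contributes, in discovery order
def pvNew (seen : List String) : List String → List String
  | [] => []
  | a :: t => if a ∈ seen then pvNew seen t else a :: pvNew (seen ++ [a]) t

lemma pvGetD_len (rgraph : List (String × List String)) (k : String) :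
    (pvGetD rgraph k).length ≤ (rgraph.flatMap (fun p => p.2)).length := by
  induction rgraph with
  | nil => simp [pvGetD]
  | cons h t ih =>
      obtain ⟨k', v⟩ := h
      simp only [pvGetD, List.flatMap_cons, List.length_append]
      split
      · omega
      · omega

lemma pvGetD_not_key (rgraph : List (String × List String)) (k : String)
    (h : k ∉ rgraph.map Prod.fst) : pvGetD rgraph k = [] := by
  induction rgraph with
  | nil => rfl
  | cons hd t ih =>
      obtain ⟨k', v⟩ := hd
      simp only [List.map_cons, List.mem_cons] at h
      push Not at h
      simp only [pvGetD]
      rw [if_neg (by exact fun he => h.1 he.symm)]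
      exact ih h.2

lemma pvFilterLen (seen : List String) (m : String) (hns : m ∉ seen) :
    ∀ (K : List String), K.Nodup → m ∈ K →
    (K.filter (fun x => x ∉ seen ++ [m])).length + 1 = (K.filter (fun x => x ∉ seen)).length := by
  intro K
  induction K with
  | nil => intro _ hm; simp at hm
  | cons x t ih =>
      intro hnd hm
      have hnd' := List.nodup_cons.1 hnd
      by_cases hxm : x = m
      · have hmnott : m ∉ t := hxm ▸ hnd'.1
        simp only [List.filter_cons]
        rw [if_neg (by simp [hxm]), if_pos (by simp [hxm, hns])]
        have : t.filter (fun y => decide (y ∉ seen ++ [m])) = t.filter (fun y => decide (y ∉ seen)) := by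
          apply List.filter_congr
          intro y hy
          have hym : y ≠ m := fun he => hmnott (he ▸ hy)
          simp [List.mem_append, hym]
        rw [this]
        simp
      · have hmt : m ∈ t := (List.mem_cons.1 hm).resolve_left (fun he => hxm he.symm)
        have ht := ih hnd'.2 hmt
        simp only [List.filter_cons]
        by_cases hx : x ∈ seen
        · rw [if_neg (by simp [hx]), if_neg (by simp [hx])]
          exact ht
        · rw [if_pos (by simp [List.mem_append, hx, hxm]), if_pos (by simp [hx])]
          simp only [List.length_cons]
          omega

lemma pvCountK_append_mem (rgraph : List (String × List String)) (seen : List String) (m : String)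
    (hm : m ∈ (rgraph.map Prod.fst).dedup) (hns : m ∉ seen) :
    pvCountK rgraph (seen ++ [m]) + 1 = pvCountK rgraph seen := by
  unfold pvCountK
  exact pvFilterLen seen m hns _ (List.nodup_dedup _) hm

lemma pvCountK_append_not_mem (rgraph : List (String × List String)) (seen : List String) (m : String)
    (hm : m ∉ (rgraph.map Prod.fst).dedup) :
    pvCountK rgraph (seen ++ [m]) = pvCountK rgraph seen := by
  unfold pvCountK
  congr 1
  apply List.filter_congr
  intro y hy
  have : y ≠ m := fun he => hm (he ▸ hy)
  simp [List.mem_append, this]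

lemma pvStep_phi (rgraph : List (String × List String)) (seen acc : List String) (m : String) :
    ((pvStep rgraph (seen, acc) m).2).length
      + ((rgraph.flatMap (fun p => p.2)).length + 1) * pvCountK rgraph (pvStep rgraph (seen, acc) m).1
    ≤ acc.length + ((rgraph.flatMap (fun p => p.2)).length + 1) * pvCountK rgraph seen := by
  set V := (rgraph.flatMap (fun p => p.2)).length with hV
  by_cases hm : m ∈ seen
  · simp [pvStep, hm]
  · simp only [pvStep, if_neg hm]
    have happ : ((pvGetD rgraph m).filter (fun p => p ∉ seen ++ [m])).length ≤ V := by
      calc ((pvGetD rgraph m).filter (fun p => p ∉ seen ++ [m])).length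
          ≤ (pvGetD rgraph m).length := List.length_filter_le _ _
        _ ≤ V := pvGetD_len rgraph m
    by_cases hk : m ∈ (rgraph.map Prod.fst).dedup
    · have hc := pvCountK_append_mem rgraph seen m hk hm
      have : (V + 1) * pvCountK rgraph seen
          = (V + 1) * pvCountK rgraph (seen ++ [m]) + (V + 1) := by
        rw [← hc]; ring
      simp only [List.length_append]
      omega
    · have hz : pvGetD rgraph m = [] := by
        apply pvGetD_not_key
        intro hmem
        exact hk ((List.mem_dedup).2 hmem)
      have hc := pvCountK_append_not_mem rgraph seen m hk
      simp [hz, hc]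

lemma pvFoldl_phi (rgraph : List (String × List String)) :
    ∀ (mods seen acc : List String),
    ((mods.foldl (pvStep rgraph) (seen, acc)).2).length
      + ((rgraph.flatMap (fun p => p.2)).length + 1) * pvCountK rgraph (mods.foldl (pvStep rgraph) (seen, acc)).1
    ≤ acc.length + ((rgraph.flatMap (fun p => p.2)).length + 1) * pvCountK rgraph seen := by
  intro mods
  induction mods with
  | nil => intro seen acc; simp
  | cons m ms ih =>
      intro seen acc
      have h1 := pvStep_phi rgraph seen acc m
      have h2 := ih (pvStep rgraph (seen, acc) m).1 (pvStep rgraph (seen, acc) m).2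
      simp only [List.foldl_cons]
      calc _ ≤ _ := h2
        _ ≤ _ := h1

lemma pvBridge (rgraph : List (String × List String)) :
    ∀ (mods rest acc seen : List String) (f : Nat),
    pvLoopA rgraph (mods.length + f) seen (mods ++ (rest ++ acc)) =
      pvLoopA rgraph f (mods.foldl (pvStep rgraph) (seen, acc)).1
        (rest ++ (mods.foldl (pvStep rgraph) (seen, acc)).2) := by
  intro mods
  induction mods with
  | nil => intro rest acc seen f; simp
  | cons m ms ih =>
      intro rest acc seen f
      have hlen : (m :: ms).length + f = (ms.length + f) + 1 := by simp; omega
      rw [hlen]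
      by_cases hm : m ∈ seen
      · simp only [List.cons_append, pvLoopA, List.foldl_cons, pvStep, if_pos hm]
        exact ih rest acc seen f
      · simp only [List.cons_append, pvLoopA, List.foldl_cons, pvStep, if_neg hm]
        have hass : (ms ++ (rest ++ acc)) ++ (pvGetD rgraph m).filter (fun p => p ∉ seen ++ [m])
            = ms ++ (rest ++ (acc ++ (pvGetD rgraph m).filter (fun p => p ∉ seen ++ [m]))) := by
          simp [List.append_assoc]
        rw [hass]
        exact ih rest (acc ++ (pvGetD rgraph m).filter (fun p => p ∉ seen ++ [m])) (seen ++ [m]) f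

lemma pvMain (rgraph : List (String × List String)) :
    ∀ (fB fA : Nat) (seen queue : List String),
    pvPhi rgraph seen queue < fA → pvPhi rgraph seen queue < fB →
    pvLoopA rgraph fA seen queue = pvLoopF rgraph fB seen queue := by
  intro fB
  induction fB with
  | zero => intro fA seen queue hA hB; omega
  | succ fB ih =>
      intro fA seen queue hA hB
      match queue with
      | [] =>
          have hA1 : 0 < fA := lt_of_le_of_lt (Nat.zero_le _) hA
          match fA, hA1 with
          | fA' + 1, _ => simp [pvLoopA, pvLoopF]
      | m :: q =>
          have hqlen : (m :: q).length ≤ pvPhi rgraph seen (m :: q) := by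
            unfold pvPhi; omega
          obtain ⟨f', hf'⟩ : ∃ f', fA = (m :: q).length + f' := ⟨fA - (m :: q).length, by omega⟩
          subst hf'
          have hb := pvBridge rgraph (m :: q) [] [] seen f'
          simp only [List.append_nil, List.nil_append] at hb
          rw [hb]
          have hBdef : pvLoopF rgraph (fB + 1) seen (m :: q)
              = pvLoopF rgraph fB ((m :: q).foldl (pvStep rgraph) (seen, [])).1
                  ((m :: q).foldl (pvStep rgraph) (seen, [])).2 := by
            simp [pvLoopF]
          rw [hBdef]
          have hphi := pvFoldl_phi rgraph (m :: q) seen []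
          have hphi' : pvPhi rgraph ((m :: q).foldl (pvStep rgraph) (seen, [])).1
              ((m :: q).foldl (pvStep rgraph) (seen, [])).2
              + (m :: q).length ≤ pvPhi rgraph seen (m :: q) := by
            unfold pvPhi
            simp only [List.length_nil, Nat.zero_add] at hphi
            have : (m :: q).length = q.length + 1 := by simp
            unfold pvPhi at hqlen
            omega
          apply ih
          · unfold pvPhi at hphi' hA ⊢; omega
          · have hb1 : 1 ≤ (m :: q).length := by simp
            unfold pvPhi at hphi' hB ⊢; omega

-- ========== set-update algebra ==========

lemma pvUpd_foldl (s : List String) (xs : List String) :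
    xs.foldl PySem.Set.add s = PySem.Set.update s xs := by
  induction xs generalizing s with
  | nil => simp [PySem.Set.update_nil]
  | cons x t ih => simp [PySem.Set.update_cons, List.foldl_cons, ih]

lemma pvOfList_eq_update (xs : List String) :
    PySem.Set.ofList xs = PySem.Set.update [] xs := by
  rw [PySem.Set.ofList_eq_foldl, pvUpd_foldl]

lemma pvMem_update {x : String} {s xs : List String} :
    x ∈ PySem.Set.update s xs ↔ x ∈ s ∨ x ∈ xs := PySem.Set.mem_update s xs x

lemma pvUpd_self (s xs : List String) (h : ∀ p ∈ xs, p ∈ s) :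
    PySem.Set.update s xs = s := by
  induction xs generalizing s with
  | nil => simp [PySem.Set.update_nil]
  | cons x t ih =>
      rw [PySem.Set.update_cons, PySem.Set.add_of_mem (h x (by simp))]
      exact ih s (fun p hp => h p (by simp [hp]))

lemma pvUpd_prefix (s xs : List String) :
    ∃ t, PySem.Set.update s xs = s ++ t ∧ ∀ x ∈ t, x ∉ s := by
  induction xs generalizing s with
  | nil => exact ⟨[], by simp [PySem.Set.update_nil], by simp⟩
  | cons x t ih =>
      rw [PySem.Set.update_cons]
      by_cases hx : x ∈ s
      · rw [PySem.Set.add_of_mem hx]; exact ih s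
      · rw [PySem.Set.add_of_not_mem hx]
        obtain ⟨u, hu, hnu⟩ := ih (s ++ [x])
        refine ⟨x :: u, by simp [hu], ?_⟩
        intro y hy
        rcases List.mem_cons.1 hy with rfl | hy'
        · exact hx
        · intro hys; exact hnu y hy' (by simp [hys])

lemma pvUpd_filter (s xs T : List String) (h : ∀ p ∈ xs, p ∈ T → p ∈ s) :
    PySem.Set.update s (xs.filter (fun p => p ∉ T)) = PySem.Set.update s xs := by
  induction xs generalizing s with
  | nil => simp
  | cons x t ih =>
      by_cases hx : x ∈ T
      · have hxs : x ∈ s := h x (by simp) hx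
        rw [List.filter_cons, if_neg (by simp [hx]), PySem.Set.update_cons,
          PySem.Set.add_of_mem hxs]
        exact ih s (fun p hp hpT => h p (by simp [hp]) hpT)
      · rw [List.filter_cons, if_pos (by simp [hx]), PySem.Set.update_cons,
          PySem.Set.update_cons]
        apply ih
        intro p hp hpT
        have := h p (by simp [hp]) hpT
        simp [PySem.Set.mem_add, this]

-- the first component of A's frontier fold is exactly the set-update of seen by the frontier
lemma pvFold1_eq_upd (rgraph : List (String × List String)) :
    ∀ (fr seen nxt : List String),
    (fr.foldl (pvStep rgraph) (seen, nxt)).1 = PySem.Set.update seen fr := by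
  intro fr
  induction fr with
  | nil => intro seen nxt; simp [PySem.Set.update_nil]
  | cons a t ih =>
      intro seen nxt
      by_cases ha : a ∈ seen
      · simp only [List.foldl_cons, pvStep, if_pos ha, PySem.Set.update_cons,
          PySem.Set.add_of_mem ha]
        exact ih seen nxt
      · simp only [List.foldl_cons, pvStep, if_neg ha, PySem.Set.update_cons,
          PySem.Set.add_of_not_mem ha]
        exact ih (seen ++ [a]) _

-- the second component accumulates: fold from (seen, nxt) = fold from (seen, []) with nxt prepended
lemma pvFold2_split (rgraph : List (String × List String)) :
    ∀ (fr seen nxt : List String),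
    fr.foldl (pvStep rgraph) (seen, nxt)
      = ((fr.foldl (pvStep rgraph) (seen, [])).1, nxt ++ (fr.foldl (pvStep rgraph) (seen, [])).2) := by
  intro fr
  induction fr with
  | nil => intro seen nxt; simp
  | cons a t ih =>
      intro seen nxt
      by_cases ha : a ∈ seen
      · simp only [List.foldl_cons, pvStep, if_pos ha]
        exact ih seen nxt
      · simp only [List.foldl_cons, pvStep, if_neg ha]
        rw [ih (seen ++ [a]) (nxt ++ _), ih (seen ++ [a]) ([] ++ _)]
        simp [List.append_assoc]

lemma pvUpd_eq_append_new (seen fr : List String) :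
    PySem.Set.update seen fr = seen ++ pvNew seen fr := by
  induction fr generalizing seen with
  | nil => simp [PySem.Set.update_nil, pvNew]
  | cons a t ih =>
      rw [PySem.Set.update_cons]
      by_cases ha : a ∈ seen
      · rw [PySem.Set.add_of_mem ha, ih]
        simp [pvNew, ha]
      · rw [PySem.Set.add_of_not_mem ha, ih]
        simp [pvNew, ha]

-- folding the round body over modules whose importers are already all in n leaves n unchanged
lemma pvFoldg_id (rgraph : List (String × List String)) :
    ∀ (l n : List String), (∀ m ∈ l, ∀ p ∈ pvGetD rgraph m, p ∈ n) →
    l.foldl (fun nxt m => PySem.Set.update nxt (pvGetD rgraph m)) n = n := by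
  intro l
  induction l with
  | nil => intro n _; rfl
  | cons a t ih =>
      intro n h
      simp only [List.foldl_cons]
      rw [pvUpd_self n _ (h a (by simp))]
      exact ih n (fun m hm => h m (by simp [hm]))

-- folding the round body over the NEW elements equals updating by the collected frontier output
lemma pvNewFold (rgraph : List (String × List String)) :
    ∀ (fr seen n : List String), (∀ x ∈ seen, x ∈ n) → (∀ x ∈ fr, x ∈ n) →
    (pvNew seen fr).foldl (fun nxt m => PySem.Set.update nxt (pvGetD rgraph m)) n
      = PySem.Set.update n ((fr.foldl (pvStep rgraph) (seen, [])).2) := by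
  intro fr
  induction fr with
  | nil => intro seen n _ _; simp [pvNew, PySem.Set.update_nil]
  | cons a t ih =>
      intro seen n hs hf
      by_cases ha : a ∈ seen
      · simp only [pvNew, if_pos ha, List.foldl_cons, pvStep]
        exact ih seen n hs (fun x hx => hf x (by simp [hx]))
      · simp only [pvNew, if_neg ha, List.foldl_cons, pvStep]
        rw [pvFold2_split rgraph t (seen ++ [a]) ([] ++ _)]
        simp only [List.nil_append]
        rw [PySem.Set.update_append]
        have hfa : PySem.Set.update n ((pvGetD rgraph a).filter (fun p => p ∉ seen ++ [a]))
            = PySem.Set.update n (pvGetD rgraph a) := by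
          apply pvUpd_filter
          intro p _ hpT
          rcases List.mem_append.1 hpT with h1 | h2
          · exact hs p h1
          · have : p = a := by simpa using h2
            exact this ▸ hf a (by simp)
        rw [hfa]
        apply ih (seen ++ [a])
        · intro x hx
          rcases List.mem_append.1 hx with h1 | h2
          · exact pvMem_update.2 (Or.inl (hs x h1))
          · have : x = a := by simpa using h2
            exact pvMem_update.2 (Or.inl (this ▸ hf a (by simp)))
        · intro x hx
          exact pvMem_update.2 (Or.inl (hf x (by simp [hx])))

-- KEY ROUND IDENTITY: one fixpoint round on update(seen, fr) = update by the frontier output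
lemma pvRoundEq (rgraph : List (String × List String)) (seen fr : List String)
    (hc : ∀ m ∈ seen, ∀ p ∈ pvGetD rgraph m, p ∈ PySem.Set.update seen fr) :
    pvRound rgraph (PySem.Set.update seen fr)
      = PySem.Set.update (PySem.Set.update seen fr) ((fr.foldl (pvStep rgraph) (seen, [])).2) := by
  unfold pvRound
  have h1 : seen.foldl (fun nxt m => PySem.Set.update nxt (pvGetD rgraph m))
      (PySem.Set.update seen fr) = PySem.Set.update seen fr := by
    apply pvFoldg_id
    intro m hm p hp
    exact hc m hm p hp
  conv_lhs => rw [pvUpd_eq_append_new seen fr]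
  rw [List.foldl_append, ← pvUpd_eq_append_new seen fr, h1]
  apply pvNewFold
  · intro x hx; exact pvMem_update.2 (Or.inl hx)
  · intro x hx; exact pvMem_update.2 (Or.inr hx)

-- closure is preserved: every member of the new seen has all importers in seen' ∪ frontier'
lemma pvClosedFold' (rgraph : List (String × List String)) :
    ∀ (fr seen nxt : List String) (m : String),
    m ∈ (fr.foldl (pvStep rgraph) (seen, nxt)).1 →
    m ∈ seen ∨ ∀ p ∈ pvGetD rgraph m,
      p ∈ (fr.foldl (pvStep rgraph) (seen, nxt)).1 ++ (fr.foldl (pvStep rgraph) (seen, nxt)).2 := by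
  intro fr
  induction fr with
  | nil => intro seen nxt m hm; exact Or.inl hm
  | cons a t ih =>
      intro seen nxt m hm
      by_cases ha : a ∈ seen
      · simp only [List.foldl_cons, pvStep, if_pos ha] at hm ⊢
        exact ih seen nxt m hm
      · simp only [List.foldl_cons, pvStep, if_neg ha] at hm ⊢
        rcases ih (seen ++ [a]) _ m hm with h1 | h2
        · rcases List.mem_append.1 h1 with hs | hma
          · exact Or.inl hs
          · -- m = a : its importers were split into seen ++ [a] and the filtered leftovers
            have hmaeq : m = a := by simpa using hma
            subst hmaeq
            right
            intro p hp
            by_cases hpt : p ∈ seen ++ [m]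
            · -- p ∈ seen ++ [m] ⊆ final .1
              apply List.mem_append.2 (Or.inl _)
              rw [pvFold1_eq_upd]
              exact pvMem_update.2 (Or.inl hpt)
            · -- p went into the frontier output, which is a suffix of final .2
              apply List.mem_append.2 (Or.inr _)
              rw [pvFold2_split rgraph t (seen ++ [m]) _]
              have hF : p ∈ (pvGetD rgraph m).filter (fun p => p ∉ seen ++ [m]) := by
                simp only [List.mem_filter, decide_eq_true_eq]
                exact ⟨hp, hpt⟩
              exact List.mem_append.2 (Or.inl (List.mem_append.2 (Or.inr hF)))
        · exact Or.inr h2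
  
-- if every frontier element is already seen, the frontier fold is the identity
lemma pvAllSkip (rgraph : List (String × List String)) :
    ∀ (fr seen nxt : List String), (∀ m ∈ fr, m ∈ seen) →
    fr.foldl (pvStep rgraph) (seen, nxt) = (seen, nxt) := by
  intro fr
  induction fr with
  | nil => intro seen nxt _; rfl
  | cons a t ih =>
      intro seen nxt h
      simp only [List.foldl_cons, pvStep, if_pos (h a (by simp))]
      exact ih seen nxt (fun m hm => h m (by simp [hm]))

-- Set.equal of update s l with s decides emptiness of the added part
lemma pvEqual_iff (s l : List String) :
    PySem.Set.equal (PySem.Set.update s l) s = true ↔ PySem.Set.update s l = s := by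
  constructor
  · intro h
    obtain ⟨t, ht, hnt⟩ := pvUpd_prefix s l
    have hall := (PySem.Set.equal_iff _ _).1 h
    have ht0 : t = [] := by
      cases t with
      | nil => rfl
      | cons x u =>
          exfalso
          have hx : x ∈ PySem.Set.update s l := by rw [ht]; simp
          exact hnt x (by simp) ((hall x).1 hx)
    rw [ht, ht0, List.append_nil]
  · intro h; rw [h]
    exact (PySem.Set.equal_iff _ _).2 (fun x => Iff.rfl)

-- MAIN: the frontier loop equals the fixpoint loop
lemma pvMainFix (rgraph : List (String × List String)) :
    ∀ (fF fX : Nat) (seen fr : List String),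
    (∀ m ∈ seen, ∀ p ∈ pvGetD rgraph m, p ∈ PySem.Set.update seen fr) →
    pvPhi rgraph seen fr < fF → pvPhi rgraph seen fr < fX →
    pvLoopF rgraph fF seen fr = pvLoopFix rgraph fX (PySem.Set.update seen fr) := by
  intro fF
  induction fF with
  | zero => intro fX seen fr _ hF _; omega
  | succ fF ih =>
      intro fX seen fr hc hF hX
      match fX, hX with
      | fX + 1, hX =>
      match fr with
      | [] =>
          have hupd : PySem.Set.update seen ([] : List String) = seen := PySem.Set.update_nil ..
          rw [hupd]
          have hround : pvRound rgraph seen = seen := by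
            unfold pvRound
            apply pvFoldg_id
            intro m hm p hp
            have := hc m hm p hp
            rwa [hupd] at this
          have he : PySem.Set.equal (pvRound rgraph seen) seen = true := by
            rw [hround]; exact (PySem.Set.equal_iff _ _).2 (fun x => Iff.rfl)
          simp [pvLoopF, pvLoopFix, he]
      | m :: q =>
          set fr := m :: q with hfr
          have hfrne : fr ≠ [] := by simp [hfr]
          set S := PySem.Set.update seen fr with hS
          set f' := (fr.foldl (pvStep rgraph) (seen, [])).2 with hf'
          have hfold1 : (fr.foldl (pvStep rgraph) (seen, [])).1 = S := pvFold1_eq_upd rgraph fr seen []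
          have hFstep : pvLoopF rgraph (fF + 1) seen fr = pvLoopF rgraph fF S f' := by
            simp only [pvLoopF, hfr]
            rw [if_neg (by simp)]
            rw [← hfr, hfold1, ← hf']
          have hround : pvRound rgraph S = PySem.Set.update S f' := pvRoundEq rgraph seen fr hc
          -- phi decreases by at least the frontier length
          have hphi := pvFoldl_phi rgraph fr seen []
          rw [hfold1, ← hf'] at hphi
          have hphi' : pvPhi rgraph S f' + fr.length ≤ pvPhi rgraph seen fr := by
            unfold pvPhi at *
            simp only [List.length_nil, Nat.zero_add] at hphi
            have h1 : 1 ≤ fr.length := by simp [hfr]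
            omega
          have hfr1 : 1 ≤ fr.length := by simp [hfr]
          -- closure invariant for the next state
          have hc' : ∀ m' ∈ S, ∀ p ∈ pvGetD rgraph m', p ∈ PySem.Set.update S f' := by
            intro m' hm' p hp
            rw [← hfold1] at hm'
            rcases pvClosedFold' rgraph fr seen [] m' hm' with h1 | h2
            · exact pvMem_update.2 (Or.inl (hc m' h1 p hp))
            · have := h2 p hp
              rw [hfold1, ← hf'] at this
              rcases List.mem_append.1 this with ha | hb
              · exact pvMem_update.2 (Or.inl ha)
              · exact pvMem_update.2 (Or.inr hb)
          by_cases heq : PySem.Set.equal (pvRound rgraph S) S = true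
          · -- fixpoint reached: every frontier-output element is already in S
            have hTS : PySem.Set.update S f' = S := (pvEqual_iff S f').1 (by rwa [hround] at heq)
            have hf'S : ∀ x ∈ f', x ∈ S := by
              intro x hx
              have : x ∈ PySem.Set.update S f' := pvMem_update.2 (Or.inr hx)
              rwa [hTS] at this
            have hXside : pvLoopFix rgraph (fX + 1) S = S := by
              simp only [pvLoopFix]
              rw [if_pos (by rw [hround, hTS]; exact (PySem.Set.equal_iff _ _).2 (fun x => Iff.rfl))]
            rw [hXside, hFstep]
            -- F side: one more (skipping) round, then empty frontier
            match f', hf' with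
            | [], _ =>
                have hF2 : 1 ≤ fF := by omega
                match fF, hF2 with
                | fF + 1, _ => simp [pvLoopF]
            | x :: u, hfx =>
                have hlen2 : 2 ≤ pvPhi rgraph seen fr := by
                  have hxu : 1 ≤ (x :: u).length := by simp
                  unfold pvPhi at hphi' ⊢
                  omega
                have hF3 : 2 ≤ fF := by omega
                match fF, hF3 with
                | fF + 2, _ =>
                    simp only [pvLoopF]
                    rw [if_neg (by simp)]
                    rw [pvAllSkip rgraph (x :: u) S [] hf'S]
                    simp
          · -- not yet a fixpoint: recurse
            have hXstep : pvLoopFix rgraph (fX + 1) S = pvLoopFix rgraph fX (PySem.Set.update S f') := by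
              simp only [pvLoopFix]
              rw [if_neg heq, hround]
            rw [hFstep, hXstep]
            exact ih fX S f' hc' (by omega) (by omega)

-- ===== VERDICT (by name: the statement is the Claim_ definition above) =====
theorem transitive_importers_py_spec : Claim_equal_transitive_importers_py := by
  intro rgraph target _
  unfold Spec_transitive_importers_py transitive_importers_py transitive_importers_py_alt
  have hc : pvCountK rgraph [] ≤ (rgraph.map Prod.fst).dedup.length := by
    unfold pvCountK
    exact List.length_filter_le _ _
  have hmul : ((rgraph.flatMap (fun p => p.2)).length + 1) * pvCountK rgraph []
      ≤ ((rgraph.flatMap (fun p => p.2)).length + 1) * (rgraph.map Prod.fst).dedup.length :=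
    Nat.mul_le_mul_left _ hc
  have hphi : pvPhi rgraph [] (pvGetD rgraph target)
      < (pvGetD rgraph target).length
        + ((rgraph.flatMap (fun p => p.2)).length + 1) * (rgraph.map Prod.fst).dedup.length + 1 := by
    unfold pvPhi
    omega
  show pvLoopA rgraph
      ((pvGetD rgraph target).length
        + ((rgraph.flatMap (fun p => p.2)).length + 1) * (rgraph.map Prod.fst).dedup.length + 1)
      [] (pvGetD rgraph target)
    = pvLoopFix rgraph
      ((pvGetD rgraph target).length
        + ((rgraph.flatMap (fun p => p.2)).length + 1) * (rgraph.map Prod.fst).dedup.length + 1)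
      (PySem.Set.ofList (pvGetD rgraph target))
  rw [pvOfList_eq_update,
    pvMain rgraph _ _ [] (pvGetD rgraph target) hphi hphi,
    pvMainFix rgraph _ _ [] (pvGetD rgraph target) (by intro m hm; simp at hm) hphi hphi]
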